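-- pv_equiv track=rewrite | github.com/Edinburgh-Genome-Foundry/saboteurs | saboteurs/logical_methods/logical_methods.py | _groups_fail_table
-- ===== SOURCE A (Python) =====
-- from collections import OrderedDict
--
-- def _groups_fail_table(groups):
--     """Returns a dict associating each element to the groups it can fail.
--     This function is used both in ``plot_elements_in_group`` and
--     ``find_logical_saboteurs``.
--
--     Parameters
--     ----------
--     groups
--       Ordered dict of the form {group_name: [elements in groups]}
--
--     Returns
--     -------
--     fail_table
--       A dict {element_name: list[True False False ...]} where list[i] is True
--       if the element is part of the i-th group in the provided ordered
--       dictionnary ``groups``.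
--     """
--     groups = list(groups.values())
--     all_elements = []
--     for group in groups:
--         for element in group:
--             if element not in all_elements:
--                 all_elements.append(element)
--     return OrderedDict([
--         (element, [(element in group) for group in groups])
--         for element in all_elements
--     ])
-- ===== SOURCE B (Python) =====
-- from collections import OrderedDict
--
-- def _groups_fail_table(groups):
--     gs = list(groups.values())
--     n = len(gs)
--     table = OrderedDict()
--     for i, g in enumerate(gs):
--         for e in g:
--             if e not in table:
--                 table[e] = [False] * n
--             table[e][i] = True
--     return table
-- ===== Notes on version B (the rewrite author's own statement) =====
-- stated objective: faster
-- what changed: Replaces A's two phases (collect unique elements with a repeated linear 'not in all_elements' list scan, then re-test every element's membership in every group) by one pass over the enumerated group lists that builds the result OrderedDict directly: first sight of an element inserts a fresh all-False row of length n, and the bit for the current group index is set in place, so no membership scans remain.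
import Mathlib
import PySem

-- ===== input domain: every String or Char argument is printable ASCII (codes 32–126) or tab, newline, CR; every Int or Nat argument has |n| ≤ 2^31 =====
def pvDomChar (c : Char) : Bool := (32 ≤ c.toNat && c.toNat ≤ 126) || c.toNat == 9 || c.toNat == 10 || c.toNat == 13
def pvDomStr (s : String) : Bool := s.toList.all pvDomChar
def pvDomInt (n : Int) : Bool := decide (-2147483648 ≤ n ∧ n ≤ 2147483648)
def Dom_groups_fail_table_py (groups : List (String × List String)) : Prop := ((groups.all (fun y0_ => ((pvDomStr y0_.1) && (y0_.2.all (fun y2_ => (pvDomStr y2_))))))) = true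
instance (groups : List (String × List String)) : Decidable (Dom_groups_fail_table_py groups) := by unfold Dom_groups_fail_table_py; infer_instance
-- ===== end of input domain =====

-- B builds the fail table in one pass over the enumerated groups (first sight inserts a
-- fresh all-False row, then bit i is set), instead of A's unique-collection phase with
-- repeated list-membership scans followed by re-testing every element in every group.


-- ===== PORT A =====
-- groups = list(groups.values()); collect all_elements, skipping those already collected;
-- then an OrderedDict pairing each element with its per-group membership list — keys are distinct, returned as items.
def groups_fail_table_py (groups : List (String × List String)) : List (String × List Bool) :=
  let gs := groups.map (·.2)
  let allElements := gs.foldl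
    (fun acc g => g.foldl (fun acc e => if acc.contains e then acc else acc ++ [e]) acc) []
  (PySem.Dict.ofList
    (allElements.map (fun e => (e, gs.map (fun g => g.contains e))))).items

-- ===== PORT B =====
-- inner loop body: on first sight insert a fresh all-False row, then set the current group's bit
def gftInner (n i : Nat) (d : PySem.Dict String (List Bool)) (e : String) :
    PySem.Dict String (List Bool) :=
  let d := if d.contains e then d else d.insert e (List.replicate n false)
  d.modify e [] (fun bits => bits.set i true)

-- outer loop over the enumerated group lists
def gftLoop (n i : Nat) (gs : List (List String)) (d : PySem.Dict String (List Bool)) :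
    PySem.Dict String (List Bool) :=
  match gs with
  | [] => d
  | g :: rest => gftLoop n (i + 1) rest (g.foldl (gftInner n i) d)

def groups_fail_table_py_alt (groups : List (String × List String)) : List (String × List Bool) :=
  let gs := groups.map (·.2)
  let n := gs.length
  (gftLoop n 0 gs PySem.Dict.empty).items

-- ===== PRECONDITION & SPEC =====
def Spec_groups_fail_table_py (groups : List (String × List String)) (out : List (String × List Bool)) : Prop := out = groups_fail_table_py_alt groups
instance (groups : List (String × List String)) (out : List (String × List Bool)) : Decidable (Spec_groups_fail_table_py groups out) := by unfold Spec_groups_fail_table_py; infer_instance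

-- ===== CLAIM (what is proved, stated in full; the proofs are below) =====
def Claim_equal_groups_fail_table_py : Prop := ∀ (groups : List (String × List String)), Dom_groups_fail_table_py groups → Spec_groups_fail_table_py groups (groups_fail_table_py groups)

-- ===== LEMMAS AND PROOFS =====

-- the dedup step of A's first phase
def gftStep (acc : List String) (e : String) : List String :=
  if acc.contains e then acc else acc ++ [e]

def gftUniq1 (acc : List String) (p : List String) : List String := p.foldl gftStep acc

def gftUniqAll (ps : List (List String)) : List String := ps.foldl gftUniq1 []

def gftRow (ps : List (List String)) (e : String) : List Bool := ps.map (fun g => g.contains e)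

-- invariant state: after processing all of ps and the prefix p of the current group
def gftMid (n : Nat) (ps : List (List String)) (p : List String) : PySem.Dict String (List Bool) :=
  PySem.Dict.mk ((gftUniq1 (gftUniqAll ps) p).map
    (fun e => (e, gftRow ps e ++ p.contains e :: List.replicate (n - ps.length - 1) false)))

-- state between groups
def gftState (n : Nat) (ps : List (List String)) : PySem.Dict String (List Bool) :=
  PySem.Dict.mk ((gftUniqAll ps).map
    (fun e => (e, gftRow ps e ++ List.replicate (n - ps.length) false)))

lemma mem_gftUniq1 (x : String) (p : List String) :
    ∀ acc, x ∈ gftUniq1 acc p ↔ x ∈ acc ∨ x ∈ p := by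
  induction p with
  | nil => simp [gftUniq1]
  | cons a p ih =>
    intro acc
    have : gftUniq1 acc (a :: p) = gftUniq1 (gftStep acc a) p := rfl
    rw [this, ih]
    unfold gftStep
    split_ifs with h
    · simp only [List.contains_iff_mem] at h
      constructor
      · rintro (h' | h') <;> simp_all
      · rintro (h' | h')
        · left; exact h'
        · rcases List.mem_cons.mp h' with rfl | h'
          · left; exact h
          · right; exact h'
    · simp only [List.mem_append, List.mem_singleton, List.mem_cons]
      tauto

lemma nodup_gftUniq1 (p : List String) :
    ∀ acc, acc.Nodup → (gftUniq1 acc p).Nodup := by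
  induction p with
  | nil => simp [gftUniq1]
  | cons a p ih =>
    intro acc hnd
    have : gftUniq1 acc (a :: p) = gftUniq1 (gftStep acc a) p := rfl
    rw [this]
    apply ih
    unfold gftStep
    split_ifs with h
    · exact hnd
    · simp only [List.contains_iff_mem] at h
      simp [List.nodup_append, hnd]
      exact fun a ha hae => h (hae ▸ ha)

lemma nodup_gftUniqAll (ps : List (List String)) : (gftUniqAll ps).Nodup := by
  suffices h : ∀ acc, acc.Nodup → (ps.foldl gftUniq1 acc).Nodup from h [] List.nodup_nil
  induction ps with
  | nil => intro acc h; exact h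
  | cons g ps ih => intro acc h; exact ih _ (nodup_gftUniq1 g acc h)

lemma mem_gftUniqAll (x : String) (ps : List (List String)) :
    x ∈ gftUniqAll ps ↔ ∃ g ∈ ps, x ∈ g := by
  suffices h : ∀ acc, x ∈ ps.foldl gftUniq1 acc ↔ x ∈ acc ∨ ∃ g ∈ ps, x ∈ g by
    simpa using h []
  induction ps with
  | nil => simp
  | cons g ps ih =>
    intro acc
    simp only [List.foldl_cons, ih, mem_gftUniq1]
    simp only [List.mem_cons]
    constructor
    · rintro ((h | h) | ⟨g', hg', h⟩)
      · exact Or.inl h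
      · exact Or.inr ⟨g, Or.inl rfl, h⟩
      · exact Or.inr ⟨g', Or.inr hg', h⟩
    · rintro (h | ⟨g', (rfl | hg'), h⟩)
      · exact Or.inl (Or.inl h)
      · exact Or.inl (Or.inr h)
      · exact Or.inr ⟨g', hg', h⟩

lemma gftUniq1_append_singleton (acc p : List String) (e : String) :
    gftUniq1 acc (p ++ [e]) = gftStep (gftUniq1 acc p) e := by
  simp [gftUniq1, List.foldl_append]

lemma gftUniqAll_append_singleton (ps : List (List String)) (g : List String) :
    gftUniqAll (ps ++ [g]) = gftUniq1 (gftUniqAll ps) g := by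
  simp [gftUniqAll, List.foldl_append]

-- one element of the current group advances the invariant
lemma gftInner_mid (n : Nat) (ps : List (List String)) (p : List String) (e : String)
    (hlt : ps.length < n) :
    gftInner n ps.length (gftMid n ps p) e = gftMid n ps (p ++ [e]) := by
  classical
  set K := gftUniq1 (gftUniqAll ps) p with hK
  have hKnd : K.Nodup := nodup_gftUniq1 p _ (nodup_gftUniqAll ps)
  set rowf : String → List Bool :=
    fun x => gftRow ps x ++ p.contains x :: List.replicate (n - ps.length - 1) false with hrowf
  have hitems : (gftMid n ps p).items = K.map (fun x => (x, rowf x)) := rfl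
  have hrowlen : ∀ x, (gftRow ps x).length = ps.length := by
    intro x; simp [gftRow]
  -- contains on the state
  have hcontains : (gftMid n ps p).contains e = K.contains e := by
    by_cases h : e ∈ K
    · simp [PySem.Dict.contains, hitems, List.any_map, Function.comp_def,
        List.contains_iff_mem, List.any_eq_true, h]
    · simp [PySem.Dict.contains, hitems, List.any_map, Function.comp_def,
        List.contains_iff_mem, List.any_eq_true, h]
      exact fun x hx hxe => h (hxe ▸ hx)
  by_cases hmem : e ∈ K
  · -- key already present: the if keeps d, modify sets bit ps.length
    have hcont : (gftMid n ps p).contains e = true := by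
      simp [hcontains, List.contains_iff_mem, hmem]
    have hget : (gftMid n ps p).get? e = some (rowf e) := by
      apply PySem.Dict.get?_of_mem_items
      · rw [hitems]; exact List.mem_map_of_mem hmem
      · show ((K.map (fun x => (x, rowf x))).map (·.1)).Nodup
        rw [List.map_map]
        have hcomp : ((fun (x : String × List Bool) => x.1) ∘ fun x => (x, rowf x)) = id := rfl
        rw [hcomp, List.map_id]
        exact hKnd
    have hset : (rowf e).set ps.length true
        = gftRow ps e ++ true :: List.replicate (n - ps.length - 1) false := by
      rw [hrowf]
      have := hrowlen e
      simp [List.set_append, this]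
    unfold gftInner
    rw [hcont]
    simp only [if_true]
    rw [PySem.Dict.modify, PySem.Dict.getD, hget]
    simp only [Option.getD_some]
    have hcont2 : (gftMid n ps p).contains e = true := hcont
    rw [PySem.Dict.insert]
    rw [hcont2]
    simp only [if_true]
    unfold gftMid
    rw [gftUniq1_append_singleton, ← hK]
    have hKstep : gftStep K e = K := by
      simp [gftStep, List.contains_iff_mem, hmem]
    rw [hKstep]
    congr 1
    show (K.map (fun x => (x, rowf x))).map
        (fun pr => if pr.1 == e then (e, (rowf e).set ps.length true) else pr)
      = K.map (fun x =>
          (x, gftRow ps x ++ (p ++ [e]).contains x :: List.replicate (n - ps.length - 1) false))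
    rw [List.map_map]
    apply List.map_congr_left
    intro x hx
    by_cases hxe : x = e
    · subst hxe
      simp only [Function.comp_apply, beq_self_eq_true, if_true]
      rw [hset]
      have hx2 : (p ++ [x]).contains x = true := by
        simp [List.contains_iff_mem]
      simp [hx2]
    · simp only [Function.comp_apply]
      rw [if_neg (by simp [hxe])]
      simp only [rowf]
      simp
      exact fun h => absurd h hxe
  · -- new key: insert a fresh all-False row, then set bit ps.length
    have hcont : (gftMid n ps p).contains e = false := by
      simp only [hcontains]
      simp [List.contains_iff_mem, hmem]
    have hrowe : gftRow ps e = List.replicate ps.length false := by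
      have hnotall : ∀ g ∈ ps, e ∉ g := by
        intro g hg hcontr
        exact hmem (by rw [hK, mem_gftUniq1]; left; rw [mem_gftUniqAll]; exact ⟨g, hg, hcontr⟩)
      simp only [gftRow]
      rw [List.eq_replicate_iff]
      constructor
      · simp
      · intro b hb
        rcases List.mem_map.mp hb with ⟨g, hg, rfl⟩
        simp [List.contains_iff_mem, hnotall g hg]
    have hpe : p.contains e = false := by
      have : e ∉ p := fun h => hmem (by rw [hK, mem_gftUniq1]; right; exact h)
      simp [List.contains_iff_mem, this]
    unfold gftInner
    rw [hcont]
    simp only [Bool.false_eq_true, if_false]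
    -- the insert appends the fresh row
    have hins : (gftMid n ps p).insert e (List.replicate n false)
        = PySem.Dict.mk (K.map (fun x => (x, rowf x)) ++ [(e, List.replicate n false)]) := by
      rw [PySem.Dict.insert, hcont]
      simp [hitems]
    rw [hins]
    set d' : PySem.Dict String (List Bool) :=
      PySem.Dict.mk (K.map (fun x => (x, rowf x)) ++ [(e, List.replicate n false)]) with hd'
    have hget : d'.get? e = some (List.replicate n false) := by
      apply PySem.Dict.get?_of_mem_items
      · simp [hd']
      · show ((K.map (fun x => (x, rowf x)) ++ [(e, List.replicate n false)]).map (·.1)).Nodup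
        rw [List.map_append, List.map_map]
        have hcomp : ((fun (x : String × List Bool) => x.1) ∘ fun x => (x, rowf x)) = id := rfl
        rw [hcomp, List.map_id]
        simp only [List.map_cons, List.map_nil]
        rw [List.nodup_append]
        refine ⟨hKnd, List.nodup_singleton _, ?_⟩
        intro x hx
        simp only [List.mem_singleton]
        rintro b rfl
        exact fun h => hmem (h ▸ hx)
    have hcont2 : d'.contains e = true := by
      simp [hd', PySem.Dict.contains]
    rw [PySem.Dict.modify, PySem.Dict.getD, hget]
    simp only [Option.getD_some]
    rw [PySem.Dict.insert, hcont2]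
    simp only [if_true]
    unfold gftMid
    rw [gftUniq1_append_singleton, ← hK]
    have hKstep : gftStep K e = K ++ [e] := by
      simp [gftStep, List.contains_iff_mem, hmem]
    rw [hKstep]
    congr 1
    rw [hd']
    show (K.map (fun x => (x, rowf x)) ++ [(e, List.replicate n false)]).map
        (fun pr => if pr.1 == e then (e, (List.replicate n false).set ps.length true) else pr)
      = (K ++ [e]).map (fun x =>
          (x, gftRow ps x ++ (p ++ [e]).contains x :: List.replicate (n - ps.length - 1) false))
    rw [List.map_append, List.map_append, List.map_map]
    congr 1
    · apply List.map_congr_left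
      intro x hx
      have hxe : x ≠ e := fun h => hmem (h ▸ hx)
      simp only [Function.comp_apply]
      rw [if_neg (by simp [hxe])]
      simp only [rowf]
      simp
      exact fun h => absurd h hxe
    · simp only [List.map_cons, List.map_nil, beq_self_eq_true, if_true]
      have hsetrep : (List.replicate n false).set ps.length true
          = List.replicate ps.length false ++ true :: List.replicate (n - ps.length - 1) false := by
        have hsplit : List.replicate n false
            = List.replicate ps.length false ++ false :: List.replicate (n - ps.length - 1) false := by
          rw [← List.replicate_succ, ← List.replicate_add]
          congr 1
          omega
        rw [hsplit]
        simp [List.set_append]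
      rw [hsetrep, hrowe]
      simp [List.contains_iff_mem]

-- the whole current group advances the between-groups state
lemma gftGroup_state (n : Nat) (ps : List (List String)) (g : List String)
    (hlt : ps.length < n) :
    g.foldl (gftInner n ps.length) (gftState n ps) = gftState n (ps ++ [g]) := by
  have hmid : ∀ q p, q.foldl (gftInner n ps.length) (gftMid n ps p) = gftMid n ps (p ++ q) := by
    intro q
    induction q with
    | nil => intro p; simp
    | cons e q ih =>
      intro p
      simp only [List.foldl_cons]
      rw [gftInner_mid n ps p e hlt, ih (p ++ [e])]
      simp
  have hstart : gftState n ps = gftMid n ps [] := by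
    unfold gftState gftMid gftUniq1
    simp only [List.foldl_nil]
    congr 1
    apply List.map_congr_left
    intro x _
    have : n - ps.length = (n - ps.length - 1) + 1 := by omega
    rw [this, List.replicate_succ]
    simp
  have hend : gftMid n ps g = gftState n (ps ++ [g]) := by
    unfold gftState gftMid
    rw [gftUniqAll_append_singleton]
    apply congrArg
    apply List.map_congr_left
    intro x _
    simp [gftRow, List.map_append]
    omega
  rw [hstart]
  have := hmid g []
  simp only [List.nil_append] at this
  rw [this, hend]

-- outer loop invariant
lemma gftLoop_state (n : Nat) (rest : List (List String)) :
    ∀ ps, ps.length + rest.length = n →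
      gftLoop n ps.length rest (gftState n ps) = gftState n (ps ++ rest) := by
  induction rest with
  | nil => intro ps h; simp [gftLoop]
  | cons g rest ih =>
    intro ps h
    simp only [gftLoop]
    rw [gftGroup_state n ps g (by simp at h; omega)]
    have hlen : (ps ++ [g]).length = ps.length + 1 := by simp
    have := ih (ps ++ [g]) (by simp at h ⊢; omega)
    rw [hlen] at this
    rw [this]
    simp

-- ofList over a list with distinct keys is just that list
lemma dict_ofList_items_of_nodup {ν : Type} (l : List (String × ν))
    (h : (l.map (·.1)).Nodup) : (PySem.Dict.ofList l).items = l := by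
  suffices hgen : ∀ (l : List (String × ν)) (d : PySem.Dict String ν),
      (l.map (·.1)).Nodup → (∀ p ∈ l, d.contains p.1 = false) →
      (PySem.Dict.update d l).items = d.items ++ l by
    simpa using hgen l PySem.Dict.empty h (by intro p _; rfl)
  intro l
  induction l with
  | nil => intro d _ _; simp [PySem.Dict.update]
  | cons p l ih =>
    intro d hnd hfresh
    simp only [PySem.Dict.update, List.foldl_cons]
    have hc : d.contains p.1 = false := hfresh p (List.mem_cons_self ..)
    have hins : (d.insert p.1 p.2).items = d.items ++ [p] := by
      rw [PySem.Dict.insert, hc]; simp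
    have := ih (d.insert p.1 p.2)
      (by simp only [List.map_cons, List.nodup_cons] at hnd; exact hnd.2)
      (by
        intro q hq
        simp only [PySem.Dict.contains, hins, List.any_append, List.any_cons, List.any_nil]
        have hqd : d.contains q.1 = false := hfresh q (List.mem_cons_of_mem _ hq)
        simp only [PySem.Dict.contains] at hqd
        rw [hqd]
        simp only [List.map_cons, List.nodup_cons] at hnd
        have : q.1 ≠ p.1 := by
          intro h
          exact hnd.1 (h ▸ List.mem_map_of_mem hq)
        simp [Ne.symm this])
    show (PySem.Dict.update (d.insert p.1 p.2) l).items = d.items ++ p :: l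
    rw [this, hins]
    simp

-- ===== VERDICT (by name: the statement is the Claim_ definition above) =====
theorem groups_fail_table_py_spec : Claim_equal_groups_fail_table_py := by
  intro groups _
  unfold Spec_groups_fail_table_py
  show groups_fail_table_py groups = groups_fail_table_py_alt groups
  have hAdef : groups_fail_table_py groups
      = (PySem.Dict.ofList ((gftUniqAll (groups.map (·.2))).map
          (fun e => (e, gftRow (groups.map (·.2)) e)))).items := rfl
  have hBdef : groups_fail_table_py_alt groups
      = (gftLoop (groups.map (·.2)).length 0 (groups.map (·.2)) PySem.Dict.empty).items := rfl
  rw [hAdef, hBdef]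
  set gs := groups.map (·.2) with hgs
  have hempty : (PySem.Dict.empty : PySem.Dict String (List Bool)) = gftState gs.length [] := rfl
  have hloop := gftLoop_state gs.length gs [] (by simp)
  simp only [List.length_nil, List.nil_append] at hloop
  rw [hempty, hloop]
  rw [dict_ofList_items_of_nodup]
  · unfold gftState
    show _ = List.map _ _
    apply List.map_congr_left
    intro x _
    simp
  · simp only [List.map_map]
    have hcomp : ((fun (x : String × List Bool) => x.1) ∘ fun e => (e, gftRow gs e)) = id := rfl
    rw [hcomp, List.map_id]
    exact nodup_gftUniqAll gs
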